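-- pv_equiv track=rewrite | github.com/mboldrick/pyside6-exp | praveen_ocr.py | readexcel_searchwords
-- ===== SOURCE A (Python) =====
-- def text_search_finder(data_list, prefix, raw_text):
--     found = False
--     text = None
--     if prefix in raw_text:
--         for data_item in data_list:
--             if data_item in raw_text:
--                 found = True
--                 text = data_item
--                 break
--     return found, text
--
-- def readexcel_searchwords(data_dict, raw_text):
--     raw_text = raw_text.upper()
--     found = False
--     text = None
--     for prefix, data_list in data_dict.items():
--         found, text = text_search_finder(data_list, prefix, raw_text)
--         if found:
--             break
--     return found, text
-- ===== SOURCE B (Python) =====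
-- def readexcel_searchwords(data_dict, raw_text):
--     # Index the text once: the set of all its substrings whose length is some
--     # pattern length, then every 'pattern in text' test is a set lookup.
--     text = raw_text.upper()
--     items = list(data_dict.items())
--     lengths = {len(w) for prefix, words in items for w in [prefix] + words}
--     subs = {text[i:i + n] for n in lengths for i in range(len(text) - n + 1)}
--     for prefix, words in items:
--         if prefix in subs:
--             for w in words:
--                 if w in subs:
--                     return True, w
--     return False, None
-- ===== Notes on version B (the rewrite author's own statement) =====
-- stated objective: faster
-- what changed: B indexes the uppercased text once into a set of all its substrings of the occurring pattern lengths, then answers every 'pattern in text' test by an O(1) set lookup, instead of A's repeated substring scan of the text per prefix and per list item.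
import Mathlib
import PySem

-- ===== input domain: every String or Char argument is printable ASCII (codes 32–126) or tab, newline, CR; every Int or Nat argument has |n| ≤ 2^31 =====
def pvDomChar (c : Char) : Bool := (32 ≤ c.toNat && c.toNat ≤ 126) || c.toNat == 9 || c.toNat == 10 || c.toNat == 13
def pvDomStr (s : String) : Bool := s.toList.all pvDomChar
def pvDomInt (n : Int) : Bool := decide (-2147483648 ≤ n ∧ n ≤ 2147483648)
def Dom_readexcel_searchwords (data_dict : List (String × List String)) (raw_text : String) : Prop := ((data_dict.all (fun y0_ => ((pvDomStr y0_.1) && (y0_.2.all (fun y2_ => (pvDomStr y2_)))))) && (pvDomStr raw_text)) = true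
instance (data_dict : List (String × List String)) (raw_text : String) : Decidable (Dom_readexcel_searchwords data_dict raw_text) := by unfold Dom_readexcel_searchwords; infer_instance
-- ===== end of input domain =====

-- B re-implements the search by indexing the text once (the set of all substrings of the
-- pattern lengths) and replacing every 'pattern in text' scan by a set-membership lookup;
-- objective: faster (measured), same return value.

-- ===== PORT A =====
def pvTsfLoop (raw_text : String) : List String → Bool × Option String
  | [] => (false, none)
  | w :: rest =>
      if PySem.Str.isIn w raw_text then (true, some w) else pvTsfLoop raw_text rest

def text_search_finder (data_list : List String) (pre : String) (raw_text : String) :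
    Bool × Option String :=
  if PySem.Str.isIn pre raw_text then pvTsfLoop raw_text data_list else (false, none)

def pvALoop (raw_text : String) (st : Bool × Option String) :
    List (String × List String) → Bool × Option String
  | [] => st
  | (pre, data_list) :: rest =>
      let r := text_search_finder data_list pre raw_text
      if r.1 then r else pvALoop raw_text r rest

def readexcel_searchwords (data_dict : List (String × List String)) (raw_text : String) :
    Bool × Option String :=
  pvALoop (PySem.Str.upper raw_text) (false, none) data_dict

-- ===== PORT B =====
def pvLengths (items : List (String × List String)) : PySem.Set Int :=
  PySem.Set.ofList
    (items.flatMap (fun pr => (pr.1 :: pr.2).map (fun w => (PySem.Str.len w : Int))))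

def pvSubsList (text : String) (lengths : List Int) : List String :=
  lengths.flatMap (fun n =>
    (PySem.List.pyRange 0 ((PySem.Str.len text : Int) - n + 1) 1).map
      (fun i => PySem.Str.slice text (some i) (some (i + n))))

def pvBInner (subs : PySem.Set String) : List String → Option String
  | [] => none
  | w :: rest => if PySem.Set.contains subs w then some w else pvBInner subs rest

def pvBLoop (subs : PySem.Set String) : List (String × List String) → Bool × Option String
  | [] => (false, none)
  | (pre, words) :: rest =>
      if PySem.Set.contains subs pre then
        match pvBInner subs words with
        | some w => (true, some w)
        | none => pvBLoop subs rest
      else pvBLoop subs rest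

def readexcel_searchwords_alt (data_dict : List (String × List String)) (raw_text : String) :
    Bool × Option String :=
  let text := PySem.Str.upper raw_text
  let lengths := pvLengths data_dict
  let subs := PySem.Set.ofList (pvSubsList text lengths)
  pvBLoop subs data_dict

-- ===== PRECONDITION & SPEC =====
def Spec_readexcel_searchwords (data_dict : List (String × List String)) (raw_text : String) (out : Bool × Option String) : Prop := out = readexcel_searchwords_alt data_dict raw_text
instance (data_dict : List (String × List String)) (raw_text : String) (out : Bool × Option String) : Decidable (Spec_readexcel_searchwords data_dict raw_text out) := by unfold Spec_readexcel_searchwords; infer_instance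

-- ===== CLAIM (what is proved, stated in full; the proofs are below) =====
def Claim_equal_readexcel_searchwords : Prop := ∀ (data_dict : List (String × List String)) (raw_text : String), Dom_readexcel_searchwords data_dict raw_text → Spec_readexcel_searchwords data_dict raw_text (readexcel_searchwords data_dict raw_text)

-- ===== LEMMAS AND PROOFS =====

-- any slice of a list is an infix of it
theorem pvSlice_infix {α : Type} (xs : List α) (a b : Int) :
    PySem.List.slice xs (some a) (some b) <:+: xs := by
  unfold PySem.List.slice
  exact ((List.take_prefix _ _).isInfix).trans ((List.drop_suffix _ _).isInfix)

-- a string of a listed length is in the substring index iff it occurs in the text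
theorem pv_mem_pvSubsList (s : String) (L : List Int) (w : String)
    (hL : (PySem.Str.len w : Int) ∈ L) :
    w ∈ pvSubsList s L ↔ PySem.Str.isIn w s = true := by
  constructor
  · intro hw
    rcases List.mem_flatMap.mp hw with ⟨n, _, hmem⟩
    rcases List.mem_map.mp hmem with ⟨i, _, hslice⟩
    rw [PySem.Str.isIn_iff_infix]
    have ht : w.toList = PySem.List.slice s.toList (some i) (some (i + n)) := by
      rw [← hslice]; simp [PySem.Str.slice]
    rw [ht]
    exact pvSlice_infix _ _ _
  · intro hin
    rcases (PySem.Str.isIn_iff_infix w s).mp hin with ⟨pre, suf, hsplit⟩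
    apply List.mem_flatMap.mpr
    refine ⟨(PySem.Str.len w : Int), hL, ?_⟩
    apply List.mem_map.mpr
    refine ⟨(pre.length : Int), ?_, ?_⟩
    · rw [PySem.List.mem_pyRange_one]
      have hlen : s.toList.length = pre.length + w.toList.length + suf.length := by
        rw [← hsplit]; simp; omega
      constructor
      · positivity
      · simp only [PySem.Str.len_eq]
        omega
    · apply String.toList_inj.mp
      have h2 : (PySem.Str.len w : Int) = (w.toList.length : Int) := by
        simp [PySem.Str.len]
      rw [h2]
      have : PySem.List.slice s.toList (some (pre.length : Int))
          (some ((pre.length : Int) + (w.toList.length : Int))) = w.toList := by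
        rw [PySem.List.slice_natCast_add]
        rw [← hsplit, List.append_assoc, List.drop_left, List.take_left]
      simpa [PySem.Str.slice] using this

-- membership test against the index equals the substring test, as Bools
theorem pv_contains_subs (s : String) (L : List Int) (w : String)
    (hL : (PySem.Str.len w : Int) ∈ L) :
    PySem.Set.contains (PySem.Set.ofList (pvSubsList s L)) w = PySem.Str.isIn w s := by
  have h : PySem.Set.contains (PySem.Set.ofList (pvSubsList s L)) w = true
      ↔ PySem.Str.isIn w s = true := by
    rw [PySem.Set.contains_iff, PySem.Set.mem_ofList]
    exact pv_mem_pvSubsList s L w hL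
  cases hc : PySem.Set.contains (PySem.Set.ofList (pvSubsList s L)) w <;>
    cases hi : PySem.Str.isIn w s <;> simp_all

-- every pattern of the dict has its length listed
theorem pv_len_mem_pvLengths (d : List (String × List String)) (p : String) (l : List String)
    (hpl : (p, l) ∈ d) (w : String) (hw : w = p ∨ w ∈ l) :
    (PySem.Str.len w : Int) ∈ pvLengths d := by
  unfold pvLengths
  rw [PySem.Set.mem_ofList]
  apply List.mem_flatMap.mpr
  refine ⟨(p, l), hpl, ?_⟩
  apply List.mem_map.mpr
  refine ⟨w, ?_, rfl⟩
  rcases hw with h | h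
  · simp [h]
  · simp [h]

-- the inner scans agree
theorem pv_inner_eq (s : String) (subs : PySem.Set String) (l : List String)
    (h : ∀ w ∈ l, PySem.Set.contains subs w = PySem.Str.isIn w s) :
    pvTsfLoop s l =
      (match pvBInner subs l with
        | some w => (true, some w)
        | none => (false, none)) := by
  induction l with
  | nil => rfl
  | cons w rest ih =>
      have hw := h w (by simp)
      simp only [pvTsfLoop, pvBInner, ← hw]
      cases hc : PySem.Set.contains subs w
      · simpa using ih (fun v hv => h v (by simp [hv]))
      · simp

-- the outer loops agree
theorem pv_loop_eq (s : String) (subs : PySem.Set String) (d : List (String × List String))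
    (h : ∀ p l, (p, l) ∈ d → PySem.Set.contains subs p = PySem.Str.isIn p s
          ∧ ∀ w ∈ l, PySem.Set.contains subs w = PySem.Str.isIn w s) :
    pvALoop s (false, none) d = pvBLoop subs d := by
  induction d with
  | nil => rfl
  | cons pr rest ih =>
      obtain ⟨p, l⟩ := pr
      obtain ⟨hp, hl⟩ := h p l (by simp)
      have ihr := ih (fun p' l' hm => h p' l' (by simp [hm]))
      simp only [pvALoop, pvBLoop, text_search_finder, ← hp]
      cases hc : PySem.Set.contains subs p
      · simpa using ihr
      · rw [if_pos rfl, pv_inner_eq s subs l hl]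
        cases hb : pvBInner subs l
        · simpa using ihr
        · simp

-- ===== VERDICT (by name: the statement is the Claim_ definition above) =====
theorem readexcel_searchwords_spec : Claim_equal_readexcel_searchwords := by
  intro d raw _dom
  unfold Spec_readexcel_searchwords readexcel_searchwords readexcel_searchwords_alt
  apply pv_loop_eq
  intro p l hpl
  constructor
  · exact pv_contains_subs _ _ p (pv_len_mem_pvLengths d p l hpl p (Or.inl rfl))
  · intro w hw
    exact pv_contains_subs _ _ w (pv_len_mem_pvLengths d p l hpl w (Or.inr hw))
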